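-- pv_equiv track=rewrite | github.com/EmptyDot/magic-square | square_check.py | generate_arrays
-- ===== SOURCE A (Python) =====
-- def generate_arrays(n):
--     """Generate the arrays"""
--     # generate arr1
--     for a1 in range(1, n - 1):
--         for a2 in range(1, n - 1):
--             # check if arr1 is valid
--             if a1 + a2 >= n - 1:  # this ensures that a0 > 0
--                 break
--             if a1 != a2:
--                 # get the missing number in the array
--                 a0 = n - a1 - a2
--                 # check if a0 is valid
--                 if a0 not in (a1, a2):
--                     arr1 = (a0, a1, a2)
--                     # generate arr2
--                     for b1 in range(1, n - 1):
--                         # get the missing number in the array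
--                         b2 = n - a0 - b1
--                         if b1 + a0 >= n - 1:  # this ensures that b2 > 0
--                             break
--                         # check if arr2 is valid
--                         if b1 != b2 and all(b not in arr1 for b in (b1, b2)):
--                             arr2 = (a0, b1, b2)
--                             # compare arr1 and arr2 and check if they are valid together
--                             if compare(arr1, arr2, n) and compare(arr2, arr1, n):
--                                 yield arr1, arr2
--     return None, None
--
-- def compare(a, b, n):
--     """Compare two arrays"""
--     expr1 = a[2] + b[2] - b[1]
--     expr2 = n - 2 * a[2] + a[0] - b[2]
--     return expr1 == expr2 and expr1 > 0
-- ===== SOURCE B (Python) =====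
-- def generate_arrays(n):
--     """Generate the arrays.
--
--     The two compare() equalities are solved algebraically: they admit a
--     solution only when n is divisible by three, and then they pin a unique
--     candidate b1 for each (a1, a2); B tests that single candidate instead
--     of scanning the whole inner loop over b1.
--     """
--     if n % 3 != 0:
--         return
--     m = n // 3
--     for a1 in range(1, n - 1):
--         for a2 in range(1, n - 1 - a1):
--             if a1 == a2:
--                 continue
--             a0 = n - a1 - a2
--             if a0 == a1 or a0 == a2:
--                 continue
--             b1 = m - a0 + a2
--             if b1 < 1 or b1 + a0 >= n - 1:
--                 continue
--             b2 = n - a0 - b1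
--             if b1 == b2:
--                 continue
--             if b1 in (a0, a1, a2) or b2 in (a0, a1, a2):
--                 continue
--             if a2 + b2 - b1 > 0 and b2 + a2 - a1 > 0:
--                 yield (a0, a1, a2), (a0, b1, b2)
-- ===== Notes on version B (the rewrite author's own statement) =====
-- stated objective: faster
-- what changed: The two compare() equalities are solved algebraically: they admit a solution only when n is divisible by three and then pin a unique candidate b1 per (a1, a2), so B tests that single candidate instead of scanning the whole inner b1 loop.
import Mathlib
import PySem

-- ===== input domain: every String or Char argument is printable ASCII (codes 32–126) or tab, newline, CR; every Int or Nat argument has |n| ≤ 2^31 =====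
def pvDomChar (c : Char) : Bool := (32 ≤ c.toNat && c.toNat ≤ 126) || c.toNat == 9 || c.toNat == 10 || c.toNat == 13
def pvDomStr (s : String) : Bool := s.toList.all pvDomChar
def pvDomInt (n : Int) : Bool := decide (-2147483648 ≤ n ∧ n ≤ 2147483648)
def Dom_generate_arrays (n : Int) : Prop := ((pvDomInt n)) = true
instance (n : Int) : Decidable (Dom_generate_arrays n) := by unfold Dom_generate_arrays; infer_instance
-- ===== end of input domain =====

-- B solves the compare() equalities for the unique inner candidate b1 (O(n^2) instead of A's O(n^3)).
-- A is a generator; the value compared is the list of yielded pairs.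

-- ===== PORT A =====
def pvCompare (a b : Int × Int × Int) (n : Int) : Bool :=
  let expr1 := a.2.2 + b.2.2 - b.2.1
  let expr2 := n - 2 * a.2.2 + a.1 - b.2.2
  (expr1 == expr2) && decide (0 < expr1)

def pvInnerA (n a0 a1 a2 : Int) : List Int → List (List Int × List Int)
  | [] => []
  | b1 :: rest =>
    let b2 := n - a0 - b1
    if b1 + a0 ≥ n - 1 then []
    else if b1 ≠ b2 ∧ b1 ∉ ([a0, a1, a2] : List Int) ∧ b2 ∉ ([a0, a1, a2] : List Int) then
      if pvCompare (a0, a1, a2) (a0, b1, b2) n = true ∧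
         pvCompare (a0, b1, b2) (a0, a1, a2) n = true then
        ([a0, a1, a2], [a0, b1, b2]) :: pvInnerA n a0 a1 a2 rest
      else pvInnerA n a0 a1 a2 rest
    else pvInnerA n a0 a1 a2 rest

def pvMidA (n a1 : Int) : List Int → List (List Int × List Int)
  | [] => []
  | a2 :: rest =>
    if a1 + a2 ≥ n - 1 then []
    else if a1 ≠ a2 then
      let a0 := n - a1 - a2
      if a0 ≠ a1 ∧ a0 ≠ a2 then
        pvInnerA n a0 a1 a2 (PySem.List.pyRange 1 (n - 1) 1) ++ pvMidA n a1 rest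
      else pvMidA n a1 rest
    else pvMidA n a1 rest

def generate_arrays (n : Int) : List (List Int × List Int) :=
  (PySem.List.pyRange 1 (n - 1) 1).flatMap (fun a1 =>
    pvMidA n a1 (PySem.List.pyRange 1 (n - 1) 1))

-- ===== PORT B =====
def pvAltCell (n m a1 a2 : Int) : List (List Int × List Int) :=
  if a1 == a2 then []
  else
    let a0 := n - a1 - a2
    if a0 == a1 || a0 == a2 then []
    else
      let b1 := m - a0 + a2
      if b1 < 1 || b1 + a0 ≥ n - 1 then []
      else
        let b2 := n - a0 - b1
        if b1 == b2 then []
        else if b1 == a0 || b1 == a1 || b1 == a2 || b2 == a0 || b2 == a1 || b2 == a2 then []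
        else if 0 < a2 + b2 - b1 ∧ 0 < b2 + a2 - a1 then [([a0, a1, a2], [a0, b1, b2])]
        else []

def generate_arrays_alt (n : Int) : List (List Int × List Int) :=
  if PySem.Int.mod n 3 ≠ 0 then []
  else
    let m := PySem.Int.floordiv n 3
    (PySem.List.pyRange 1 (n - 1) 1).flatMap (fun a1 =>
      (PySem.List.pyRange 1 (n - 1 - a1) 1).flatMap (fun a2 => pvAltCell n m a1 a2))

-- ===== PRECONDITION & SPEC =====
def Spec_generate_arrays (n : Int) (out : List (List Int × List Int)) : Prop := out = generate_arrays_alt n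
instance (n : Int) (out : List (List Int × List Int)) : Decidable (Spec_generate_arrays n out) := by unfold Spec_generate_arrays; infer_instance

-- ===== CLAIM (what is proved, stated in full; the proofs are below) =====
def Claim_equal_generate_arrays : Prop := ∀ (n : Int), Dom_generate_arrays n → Spec_generate_arrays n (generate_arrays n)

-- ===== LEMMAS AND PROOFS =====

-- yield condition of A's innermost loop body (after the break test)
abbrev pvQ (n a0 a1 a2 b1 : Int) : Prop :=
  (b1 ≠ n - a0 - b1 ∧ b1 ∉ ([a0, a1, a2] : List Int) ∧ (n - a0 - b1) ∉ ([a0, a1, a2] : List Int)) ∧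
  (pvCompare (a0, a1, a2) (a0, b1, n - a0 - b1) n = true ∧
   pvCompare (a0, b1, n - a0 - b1) (a0, a1, a2) n = true)

def pvG (n a0 a1 a2 b1 : Int) : Option (List Int × List Int) :=
  if pvQ n a0 a1 a2 b1 then some ([a0, a1, a2], [a0, b1, n - a0 - b1]) else none

theorem pvG_some {n a0 a1 a2 b1 : Int} (h : pvQ n a0 a1 a2 b1) :
    pvG n a0 a1 a2 b1 = some ([a0, a1, a2], [a0, b1, n - a0 - b1]) := by
  rw [pvG, if_pos h]

theorem pvG_none {n a0 a1 a2 b1 : Int} (h : ¬ pvQ n a0 a1 a2 b1) :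
    pvG n a0 a1 a2 b1 = none := by
  rw [pvG, if_neg h]

-- A's inner loop = filterMap over the range truncated at the break point
theorem pvInnerA_range (n a0 a1 a2 : Int) (a b : Int) :
    pvInnerA n a0 a1 a2 (PySem.List.pyRange a b 1) =
      (PySem.List.pyRange a (min b (n - 1 - a0)) 1).filterMap (pvG n a0 a1 a2) := by
  by_cases hba : b ≤ a
  · rw [PySem.List.pyRange_one_eq_nil hba,
       PySem.List.pyRange_one_eq_nil (show min b (n - 1 - a0) ≤ a by omega)]
    simp [pvInnerA]
  · rw [not_le] at hba
    rw [PySem.List.pyRange_one_cons hba]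
    by_cases hbr : a + a0 ≥ n - 1
    · rw [PySem.List.pyRange_one_eq_nil (show min b (n - 1 - a0) ≤ a by omega)]
      simp [pvInnerA, hbr]
    · rw [show PySem.List.pyRange a (min b (n - 1 - a0)) 1
            = a :: PySem.List.pyRange (a + 1) (min b (n - 1 - a0)) 1 from
          PySem.List.pyRange_one_cons (by omega)]
      have ih := pvInnerA_range n a0 a1 a2 (a + 1) b
      simp only [pvInnerA, if_neg hbr]
      by_cases hq : pvQ n a0 a1 a2 a
      · rw [List.filterMap_cons_some (pvG_some hq)]
        obtain ⟨hq1, hq2⟩ := hq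
        rw [if_pos hq1, if_pos hq2, ih]
      · rw [List.filterMap_cons_none (pvG_none hq)]
        rw [pvQ, not_and_or] at hq
        rcases hq with h | h
        · rw [if_neg h, ih]
        · by_cases h1 : (a ≠ n - a0 - a ∧ a ∉ ([a0, a1, a2] : List Int) ∧
              (n - a0 - a) ∉ ([a0, a1, a2] : List Int))
          · rw [if_pos h1, if_neg h, ih]
          · rw [if_neg h1, ih]
termination_by (b - a).toNat
decreasing_by omega

-- mid-loop body of A after its break test
def pvCellA (n a1 a2 : Int) : List (List Int × List Int) :=
  if a1 ≠ a2 then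
    if n - a1 - a2 ≠ a1 ∧ n - a1 - a2 ≠ a2 then
      pvInnerA n (n - a1 - a2) a1 a2 (PySem.List.pyRange 1 (n - 1) 1)
    else []
  else []

theorem pvMidA_range (n a1 : Int) (a b : Int) :
    pvMidA n a1 (PySem.List.pyRange a b 1) =
      (PySem.List.pyRange a (min b (n - 1 - a1)) 1).flatMap (pvCellA n a1) := by
  by_cases hba : b ≤ a
  · rw [PySem.List.pyRange_one_eq_nil hba,
       PySem.List.pyRange_one_eq_nil (show min b (n - 1 - a1) ≤ a by omega)]
    simp [pvMidA]
  · rw [not_le] at hba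
    rw [PySem.List.pyRange_one_cons hba]
    by_cases hbr : a1 + a ≥ n - 1
    · rw [PySem.List.pyRange_one_eq_nil (show min b (n - 1 - a1) ≤ a by omega)]
      simp [pvMidA, hbr]
    · rw [show PySem.List.pyRange a (min b (n - 1 - a1)) 1
            = a :: PySem.List.pyRange (a + 1) (min b (n - 1 - a1)) 1 from
          PySem.List.pyRange_one_cons (by omega)]
      have ih := pvMidA_range n a1 (a + 1) b
      simp only [pvMidA, if_neg hbr, List.flatMap_cons, pvCellA]
      by_cases h1 : a1 ≠ a
      · rw [if_pos h1, if_pos h1]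
        by_cases h2 : (n - a1 - a ≠ a1 ∧ n - a1 - a ≠ a)
        · rw [if_pos h2, if_pos h2, ih]
        · rw [if_neg h2, if_neg h2, ih, List.nil_append]
      · rw [if_neg h1, if_neg h1, ih, List.nil_append]
termination_by (b - a).toNat
decreasing_by omega

-- filterMap of a function supported on a single point over a Nodup list
theorem filterMap_single {α : Type} {f : Int → Option α} {c : Int}
    (h : ∀ x, x ≠ c → f x = none) :
    ∀ (l : List Int), l.Nodup → l.filterMap f = if c ∈ l then (f c).toList else [] := by
  intro l hn
  induction l with
  | nil => simp
  | cons x t ih =>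
    simp only [List.nodup_cons] at hn
    by_cases hx : x = c
    · subst hx
      have ht : t.filterMap f = [] := by
        apply List.filterMap_eq_nil_iff.mpr
        intro a ha
        exact h a (by rintro rfl; exact hn.1 ha)
      cases hfc : f x <;> simp [List.filterMap_cons, hfc, ht]
    · rw [List.filterMap_cons_none (h x hx), ih hn.2]
      simp only [List.mem_cons]
      by_cases hc : c ∈ t <;> simp [hc, hx, Ne.symm hx]

-- the crux: for a valid arr1 cell, A's inner scan equals B's single-candidate test
theorem cell_eq (n m a1 a2 : Int) (hm : n = 3 * m)
    (h1 : 1 ≤ a1) (h2 : 1 ≤ a2) (h3 : a1 + a2 < n - 1) :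
    pvCellA n a1 a2 = pvAltCell n m a1 a2 := by
  have hsupp : ∀ x, x ≠ m - (n - a1 - a2) + a2 → pvG n (n - a1 - a2) a1 a2 x = none := by
    intro x hx
    apply pvG_none
    rintro ⟨-, heq, -⟩
    simp only [pvCompare, Bool.and_eq_true, beq_iff_eq, decide_eq_true_eq] at heq
    omega
  rw [pvCellA, pvAltCell]
  by_cases hne : a1 ≠ a2
  · rw [if_pos hne, if_neg (show ¬(a1 == a2) = true from by simpa using hne)]
    by_cases hv : n - a1 - a2 ≠ a1 ∧ n - a1 - a2 ≠ a2
    · rw [if_pos hv,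
         if_neg (show ¬(n - a1 - a2 == a1 || n - a1 - a2 == a2) = true from by
           simpa using hv),
         pvInnerA_range,
         show min (n - 1) (n - 1 - (n - a1 - a2)) = n - 1 - (n - a1 - a2) from by omega,
         filterMap_single hsupp _ (PySem.List.nodup_pyRange_one 1 _)]
      by_cases hmem : (m - (n - a1 - a2) + a2) ∈ PySem.List.pyRange 1 (n - 1 - (n - a1 - a2)) 1
      · rw [if_pos hmem]
        rw [PySem.List.mem_pyRange_one] at hmem
        rw [if_neg (show ¬(decide (m - (n - a1 - a2) + a2 < 1) ||
              decide (m - (n - a1 - a2) + a2 + (n - a1 - a2) ≥ n - 1)) = true from by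
            simp only [Bool.or_eq_true, decide_eq_true_eq]; omega)]
        by_cases hq : pvQ n (n - a1 - a2) a1 a2 (m - (n - a1 - a2) + a2)
        · rw [pvG_some hq]
          obtain ⟨⟨hb12, hbm1, hbm2⟩, hcmp⟩ := hq
          simp only [List.mem_cons, List.not_mem_nil, not_or, or_false] at hbm1 hbm2
          simp only [pvCompare, Bool.and_eq_true, beq_iff_eq, decide_eq_true_eq] at hcmp
          rw [if_neg (show ¬(_ == _) = true from by simpa using hb12),
             if_neg (show ¬(_ = true) from by
               simp only [Bool.or_eq_true, beq_iff_eq, not_or]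
               omega),
             if_pos (show 0 < a2 + (n - (n - a1 - a2) - (m - (n - a1 - a2) + a2)) -
                 (m - (n - a1 - a2) + a2) ∧ 0 < (n - (n - a1 - a2) - (m - (n - a1 - a2) + a2)) +
                 a2 - a1 from by omega)]
          rfl
        · rw [pvG_none hq]
          by_cases c1 : (m - (n - a1 - a2) + a2 == n - (n - a1 - a2) - (m - (n - a1 - a2) + a2)) = true
          · rw [if_pos c1]; rfl
          · rw [if_neg c1]
            by_cases c2 : (m - (n - a1 - a2) + a2 == n - a1 - a2 || m - (n - a1 - a2) + a2 == a1 ||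
                m - (n - a1 - a2) + a2 == a2 ||
                n - (n - a1 - a2) - (m - (n - a1 - a2) + a2) == n - a1 - a2 ||
                n - (n - a1 - a2) - (m - (n - a1 - a2) + a2) == a1 ||
                n - (n - a1 - a2) - (m - (n - a1 - a2) + a2) == a2) = true
            · rw [if_pos c2]; rfl
            · rw [if_neg c2, if_neg]
              · rfl
              · simp only [beq_iff_eq] at c1
                simp only [Bool.or_eq_true, beq_iff_eq, not_or] at c2
                rintro ⟨p1, p2⟩
                apply hq
                refine ⟨⟨?_, ?_, ?_⟩, ?_, ?_⟩
                · omega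
                · simp only [List.mem_cons, List.not_mem_nil, not_or, or_false]; omega
                · simp only [List.mem_cons, List.not_mem_nil, not_or, or_false]; omega
                · simp only [pvCompare, Bool.and_eq_true, beq_iff_eq, decide_eq_true_eq]; omega
                · simp only [pvCompare, Bool.and_eq_true, beq_iff_eq, decide_eq_true_eq]; omega
      · rw [if_neg hmem]
        rw [PySem.List.mem_pyRange_one] at hmem
        rw [if_pos (show (decide (m - (n - a1 - a2) + a2 < 1) ||
              decide (m - (n - a1 - a2) + a2 + (n - a1 - a2) ≥ n - 1)) = true from by
            simp only [Bool.or_eq_true, decide_eq_true_eq]; omega)]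
    · rw [if_neg hv,
         if_pos (show (n - a1 - a2 == a1 || n - a1 - a2 == a2) = true from by
           simp only [not_and_or, not_not] at hv
           rcases hv with h | h <;> simp [h])]
  · rw [if_neg hne, if_pos (show (a1 == a2) = true from by simpa using not_not.mp hne)]

theorem mod3 (n : Int) : PySem.Int.mod n 3 = n % 3 :=
  PySem.Int.mod_eq_emod_of_pos (by norm_num)

theorem generate_arrays_eq_alt (n : Int) : generate_arrays n = generate_arrays_alt n := by
  by_cases h3 : PySem.Int.mod n 3 = 0
  · obtain ⟨m, hm⟩ : ∃ m, n = 3 * m := by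
      have := mod3 n; exact ⟨n / 3, by omega⟩
    have hfd : PySem.Int.floordiv n 3 = m := by
      rw [PySem.Int.floordiv_eq_ediv_of_pos (by norm_num)]
      have := mod3 n; omega
    rw [generate_arrays, generate_arrays_alt, if_neg (not_not_intro h3)]
    simp only [hfd]
    refine List.flatMap_congr ?_
    intro a1 ha1
    rw [PySem.List.mem_pyRange_one] at ha1
    rw [pvMidA_range, show min (n - 1) (n - 1 - a1) = n - 1 - a1 from by omega]
    refine List.flatMap_congr ?_
    intro a2 ha2
    rw [PySem.List.mem_pyRange_one] at ha2
    exact cell_eq n m a1 a2 hm (by omega) (by omega) (by omega)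
  · rw [generate_arrays_alt, if_pos h3, generate_arrays]
    apply List.flatMap_eq_nil_iff.mpr
    intro a1 ha1
    rw [pvMidA_range]
    apply List.flatMap_eq_nil_iff.mpr
    intro a2 ha2
    rw [pvCellA]
    split_ifs with hh1 hh2
    · rw [pvInnerA_range]
      apply List.filterMap_eq_nil_iff.mpr
      intro x hx
      apply pvG_none
      rintro ⟨-, heq, -⟩
      simp only [pvCompare, Bool.and_eq_true, beq_iff_eq, decide_eq_true_eq] at heq
      have := mod3 n
      omega
    · rfl
    · rfl

-- ===== VERDICT (by name: the statement is the Claim_ definition above) =====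
theorem generate_arrays_spec : Claim_equal_generate_arrays := by
  intro n _
  show generate_arrays n = generate_arrays_alt n
  exact generate_arrays_eq_alt n
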